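-- pv_equiv track=rewrite | github.com/evcann/advent-of-code | 2/2.1.py | determine_safety
-- ===== SOURCE A (Python) =====
-- def determine_safety(num_list):
--     ascending = False
--     if num_list[0] < num_list[-1]:
--         ascending = True
--     else:
--         return False # If the first and last number are the same, it automatically fails
--
--     num_list_sorted = sorted(num_list, reverse = not ascending)
--
--     if num_list != num_list_sorted: # Determine if all numbers are in order
--         return False
--
--     if len(num_list) != len(list(set(num_list))): # Check for duplicates
--         return False
--
--     for i, num in enumerate(num_list[0:-1]): # Make sure all the differences are within [1,3]
--         # [0:-1] ensures that we don't check the last number and get an out of range error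
--         if abs(int(num_list[i + 1]) - int(num)) >= 1 and abs(int(num_list[i + 1]) - int(num)) <= 3:
--             continue
--         else:
--             return False
--
--     return True # Return true if none of the tests failed
-- ===== SOURCE B (Python) =====
-- def determine_safety(num_list):
--     # One linear pass: safe iff at least two numbers and every consecutive
--     # difference is between 1 and 3 (strictly ascending is then automatic).
--     return len(num_list) >= 2 and all(1 <= b - a <= 3 for a, b in zip(num_list, num_list[1:]))
-- ===== Notes on version B (the rewrite author's own statement) =====
-- stated objective: faster
-- what changed: Replaced the sort-compare, set-based duplicate check and indexed abs-difference loop by a single linear pass over consecutive pairs checking 1 <= b - a <= 3 (which already implies strict ascent, no duplicates and first < last).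
-- outside the precondition, e.g. on determine_safety([]): A raises IndexError, B returns False
import Mathlib
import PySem

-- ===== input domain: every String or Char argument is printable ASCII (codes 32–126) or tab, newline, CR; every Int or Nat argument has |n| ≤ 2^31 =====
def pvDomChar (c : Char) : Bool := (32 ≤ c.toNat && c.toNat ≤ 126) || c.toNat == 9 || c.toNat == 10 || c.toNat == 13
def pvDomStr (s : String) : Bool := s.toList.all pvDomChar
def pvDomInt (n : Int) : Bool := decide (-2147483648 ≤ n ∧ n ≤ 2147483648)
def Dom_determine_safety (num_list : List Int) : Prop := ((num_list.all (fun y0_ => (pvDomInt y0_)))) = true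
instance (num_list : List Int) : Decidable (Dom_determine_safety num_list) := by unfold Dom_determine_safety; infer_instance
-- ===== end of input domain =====

-- B replaces A's sort-compare + set-duplicate-check + indexed abs loop by one
-- linear pass checking every consecutive difference lies in [1,3] (faster, O(n)).

-- ===== PORT A =====
-- the for-loop with 'continue' / 'return False': checks each (i, num) in turn
-- num_list[i+1] is ported as pyGetD (always in range here: i + 1 ≤ len - 1)
def detLoopA (num_list : List Int) : List (Int × Int) → Bool
  | [] => true
  | (i, num) :: rest =>
      let d := PySem.List.pyGetD num_list (i + 1) 0 - num
      if 1 ≤ |d| ∧ |d| ≤ 3 then detLoopA num_list rest else false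

def determine_safety (num_list : List Int) : Bool :=
  match PySem.List.pyGet? num_list 0, PySem.List.pyGet? num_list (-1) with
  | some first, some lastv =>
    if first < lastv then
      -- ascending = True; reverse = not ascending = False
      let num_list_sorted := PySem.List.sorted num_list (fun x => x) false
      if num_list ≠ num_list_sorted then false
      else if num_list.length ≠ (PySem.Set.ofList num_list).length then false
      else detLoopA num_list
             (PySem.List.enumerate (PySem.List.slice num_list (some 0) (some (-1))) 0)
    else false
  | _, _ => false  -- IndexError (empty list): excluded by Pre_

-- ===== PORT B =====
def determine_safety_alt (num_list : List Int) : Bool :=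
  decide (2 ≤ num_list.length) &&
    (num_list.zip num_list.tail).all (fun p => decide (1 ≤ p.2 - p.1 ∧ p.2 - p.1 ≤ 3))

-- ===== PRECONDITION & SPEC =====
-- A raises IndexError on the empty list (num_list[0]); excluded here.
def Pre_determine_safety (num_list : List Int) : Prop := num_list ≠ []
instance (num_list : List Int) : Decidable (Pre_determine_safety num_list) := by
  unfold Pre_determine_safety; infer_instance
def pvWitness_determine_safety : List Int := [1, 2, 3]

def Spec_determine_safety (num_list : List Int) (out : Bool) : Prop := out = determine_safety_alt num_list
instance (num_list : List Int) (out : Bool) : Decidable (Spec_determine_safety num_list out) := by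
  unfold Spec_determine_safety; infer_instance

-- ===== CLAIM (what is proved, stated in full; the proofs are below) =====
def Claim_equal_determine_safety : Prop := ∀ (num_list : List Int), Dom_determine_safety num_list → Pre_determine_safety num_list → Spec_determine_safety num_list (determine_safety num_list)

-- ===== LEMMAS AND PROOFS =====

-- B's pass as an index statement
lemma zip_tail_all_iff (xs : List Int) (p : Int × Int → Bool) :
    (xs.zip xs.tail).all p = true ↔
      ∀ k (h : k + 1 < xs.length), p (xs[k], xs[k + 1]) = true := by
  induction xs with
  | nil => simp
  | cons a t ih =>
    cases t with
    | nil => simp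
    | cons b t' =>
      simp only [List.tail_cons] at ih ⊢
      rw [List.zip_cons_cons, List.all_cons, Bool.and_eq_true, ih]
      constructor
      · rintro ⟨h1, h2⟩ k hk
        cases k with
        | zero => simpa using h1
        | succ k => simpa using h2 k (by simpa using hk)
      · intro h
        refine ⟨by simpa using h 0 (by simp), fun k hk => ?_⟩
        simpa using h (k + 1) (by simpa using hk)

-- the for-loop is 'all'
lemma detLoopA_eq_all (num_list : List Int) (l : List (Int × Int)) :
    detLoopA num_list l =
      l.all (fun p =>
        let d := PySem.List.pyGetD num_list (p.1 + 1) 0 - p.2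
        decide (1 ≤ |d| ∧ |d| ≤ 3)) := by
  induction l with
  | nil => rfl
  | cons q rest ih =>
    obtain ⟨i, num⟩ := q
    simp only [detLoopA, List.all_cons, ih]
    split_ifs with h
    · simp [h]
    · simp [h]

-- strictly ascending from index facts on consecutive elements
lemma pairwise_lt_of_steps (xs : List Int)
    (h : ∀ k, k + 1 < xs.length → xs[k]! < xs[k + 1]!) : xs.Pairwise (· < ·) := by
  rw [List.pairwise_iff_getElem]
  intro i j hi hj hij
  have key : ∀ d i, i + d + 1 < xs.length → xs[i]! < xs[i + d + 1]! := by
    intro d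
    induction d with
    | zero => intro i hi; exact h i hi
    | succ d ih =>
      intro i hlt
      have h1 : xs[i]! < xs[i + d + 1]! := ih i (by omega)
      have h2 : xs[i + d + 1]! < xs[i + d + 1 + 1]! := h (i + d + 1) (by omega)
      have heq : i + (d + 1) + 1 = i + d + 1 + 1 := by omega
      rw [heq]; exact lt_trans h1 h2
  have := key (j - i - 1) i (by omega)
  have hij' : i + (j - i - 1) + 1 = j := by omega
  rw [hij'] at this
  simpa [List.getElem!_eq_getElem?_getD, List.getElem?_eq_getElem, hi, hj] using this

-- A's for-loop, as an index statement over consecutive pairs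
lemma loopA_iff (xs : List Int) :
    detLoopA xs (PySem.List.enumerate (PySem.List.slice xs (some 0) (some (-1))) 0) = true ↔
      ∀ k (h : k + 1 < xs.length),
        1 ≤ |xs[k + 1] - xs[k]| ∧ |xs[k + 1] - xs[k]| ≤ 3 := by
  rw [detLoopA_eq_all, List.all_eq_true]
  simp only [PySem.List.slice_zero_start, PySem.List.slice_to_neg_one]
  constructor
  · intro h k hk
    have hk' : k < xs.dropLast.length := by simp [List.length_dropLast]; omega
    have := h ((0 : Int) + k, xs.dropLast[k])
      ((PySem.List.mem_enumerate_iff _ _ _).mpr ⟨k, hk', rfl⟩)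
    have hcast : ((0 : Int) + (k : Int) + 1) = ((k + 1 : Nat) : Int) := by push_cast; ring
    rw [hcast, PySem.List.pyGetD_natCast] at this
    have hgd : xs.getD (k + 1) 0 = xs[k + 1] := List.getD_eq_getElem xs 0 hk
    rw [hgd, List.getElem_dropLast] at this
    simpa using this
  · intro h p hp
    obtain ⟨k, hk, rfl⟩ := (PySem.List.mem_enumerate_iff _ _ _).mp hp
    have hk' : k + 1 < xs.length := by
      have := hk; simp [List.length_dropLast] at this; omega
    have hcast : ((0 : Int) + (k : Int) + 1) = ((k + 1 : Nat) : Int) := by push_cast; ring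
    simp only [hcast, PySem.List.pyGetD_natCast]
    have hgd : xs.getD (k + 1) 0 = xs[k + 1] := List.getD_eq_getElem xs 0 hk'
    rw [hgd, List.getElem_dropLast]
    simpa using h k hk'

theorem determine_safety_eq (num_list : List Int) (hne : num_list ≠ []) :
    determine_safety num_list = determine_safety_alt num_list := by
  obtain ⟨a, t, rfl⟩ := List.exists_cons_of_ne_nil hne
  rw [Bool.eq_iff_iff]
  set xs : List Int := a :: t with hxs
  have hlenpos : 0 < xs.length := by simp [hxs]
  -- unfold A to its four conditions
  have hA : determine_safety xs = true ↔
      (a < xs.getLast hne ∧ xs = PySem.List.sorted xs (fun x => x) false ∧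
        xs.length = (PySem.Set.ofList xs).length ∧
        detLoopA xs (PySem.List.enumerate (PySem.List.slice xs (some 0) (some (-1))) 0) = true) := by
    show (match PySem.List.pyGet? xs 0, PySem.List.pyGet? xs (-1) with
      | some first, some lastv =>
        if first < lastv then
          let num_list_sorted := PySem.List.sorted xs (fun x => x) false
          if xs ≠ num_list_sorted then false
          else if xs.length ≠ (PySem.Set.ofList xs).length then false
          else detLoopA xs (PySem.List.enumerate (PySem.List.slice xs (some 0) (some (-1))) 0)
        else false
      | _, _ => false) = true ↔ _
    rw [show PySem.List.pyGet? xs 0 = some a from by simp [hxs],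
        PySem.List.pyGet?_neg_one, List.getLast?_eq_some_getLast hne]
    simp only []
    split_ifs with h1 h2 h3
    · simp only [false_iff]; rintro ⟨-, hs, -, -⟩; exact h2 hs
    · simp only [false_iff]; rintro ⟨-, -, hl, -⟩; exact h3 hl
    · exact ⟨fun h => ⟨h1, not_not.mp h2, not_not.mp h3, h⟩, fun h => h.2.2.2⟩
    · simp only [false_iff]; rintro ⟨hl, -, -, -⟩; exact h1 hl
  have hB : determine_safety_alt xs = true ↔
      (2 ≤ xs.length ∧ ∀ k (h : k + 1 < xs.length),
        1 ≤ xs[k + 1] - xs[k] ∧ xs[k + 1] - xs[k] ≤ 3) := by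
    unfold determine_safety_alt
    rw [Bool.and_eq_true, decide_eq_true_iff, zip_tail_all_iff]
    simp only [decide_eq_true_iff]
  rw [hA, hB, loopA_iff]
  constructor
  · rintro ⟨hlast, hsort, -, hloop⟩
    have hpw : xs.Pairwise (· ≤ ·) := by
      have := PySem.List.sorted_pairwise xs (fun x => x) (κ := Int)
      rw [← hsort] at this
      exact this
    have hlen2 : 2 ≤ xs.length := by
      rcases t with - | ⟨b, t'⟩
      · exfalso
        have : xs.getLast hne = a := by simp [hxs]
        omega
      · simp [hxs]
    refine ⟨hlen2, fun k hk => ?_⟩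
    have hle : xs[k] ≤ xs[k + 1] := by
      rw [List.pairwise_iff_getElem] at hpw
      exact hpw k (k + 1) (by omega) hk (by omega)
    have := hloop k hk
    constructor <;> [skip; skip] <;>
      · rcases this with ⟨hl, hr⟩
        rw [abs_of_nonneg (by omega)] at hl hr
        omega
  · rintro ⟨hlen2, hsteps⟩
    have hlt : xs.Pairwise (· < ·) := by
      apply pairwise_lt_of_steps
      intro k hk
      have := hsteps k hk
      rw [List.getElem!_eq_getElem?_getD, List.getElem?_eq_getElem (by omega : k < xs.length),
          List.getElem!_eq_getElem?_getD, List.getElem?_eq_getElem hk]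
      simp only [Option.getD_some]
      omega
    have hnodup : xs.Nodup := hlt.imp ne_of_lt
    refine ⟨?_, ?_, ?_, ?_⟩
    · have : xs[0] < xs[xs.length - 1] := by
        rw [List.pairwise_iff_getElem] at hlt
        exact hlt 0 (xs.length - 1) (by omega) (by omega) (by omega)
      rw [List.getLast_eq_getElem]
      simpa [hxs] using this
    · exact (PySem.List.sorted_eq_self_of_pairwise xs (fun x => x)
        (hlt.imp le_of_lt)).symm
    · rw [PySem.Set.ofList_eq_self_of_nodup xs hnodup]
    · intro k hk
      have := hsteps k hk
      constructor <;> · rw [abs_of_nonneg (by omega)]; omega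

-- ===== VERDICT (by name: the statement is the Claim_ definition above) =====
theorem determine_safety_spec : Claim_equal_determine_safety := by
  intro num_list _ hpre
  exact determine_safety_eq num_list hpre
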